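-- pv_equiv track=rewrite | github.com/msilverblatt/harness-ml | packages/harness-sports/src/harnessml/sports/competitions/structure.py | _standard_bracket_order
-- ===== SOURCE A (Python) =====
-- def _standard_bracket_order(n: int) -> list[int]:
--     """Return the standard bracket seed ordering for *n* participants.
--
--     For *n* = 8 the result is ``[1, 8, 4, 5, 2, 7, 3, 6]`` which ensures
--     that seeds 1 and 2 can only meet in the final.
--
--     *n* must be a power of 2.
--     """
--     if n == 1:
--         return [1]
--     if n == 2:
--         return [1, 2]
--     half = _standard_bracket_order(n // 2)
--     result: list[int] = []
--     for seed in half: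
--         result.append(seed)
--         result.append(n + 1 - seed)
--     return result
-- ===== SOURCE B (Python) =====
-- def _standard_bracket_order(n: int) -> list[int]:
--     """Iterative bottom-up rebuild of the standard bracket seed ordering."""
--     sizes = []
--     m = n
--     while m > 2:
--         sizes.append(m)
--         m //= 2
--     result = [1] if m == 1 else [1, 2]
--     for size in reversed(sizes):
--         result = [x for seed in result for x in (seed, size + 1 - seed)]
--     return result
-- ===== Notes on version B (the rewrite author's own statement) =====
-- stated objective: alternative
-- what changed: Replaces the top-down recursion with an iterative bottom-up construction: collect the chain of level sizes by repeated halving, then expand the base ordering once per level with an explicit loop instead of a recursion stack.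
-- outside the precondition, e.g. on _standard_bracket_order(0): A raises RecursionError, B returns [1, 2]
import Mathlib
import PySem

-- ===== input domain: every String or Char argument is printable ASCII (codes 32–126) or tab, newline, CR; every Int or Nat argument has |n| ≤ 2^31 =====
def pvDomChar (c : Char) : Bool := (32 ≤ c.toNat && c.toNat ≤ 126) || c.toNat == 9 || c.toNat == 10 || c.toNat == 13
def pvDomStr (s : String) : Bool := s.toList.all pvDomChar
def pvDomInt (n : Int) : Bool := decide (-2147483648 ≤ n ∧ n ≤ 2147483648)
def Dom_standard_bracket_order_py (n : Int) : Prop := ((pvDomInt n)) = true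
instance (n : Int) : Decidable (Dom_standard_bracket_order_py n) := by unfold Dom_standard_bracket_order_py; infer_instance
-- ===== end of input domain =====

-- B rebuilds the ordering iteratively bottom-up (explicit list of level sizes) instead of A's
-- top-down recursion; same result on every n ≥ 1, no speed claim (objective: alternative).

-- ===== PORT A =====
-- Literal port of A's recursion; the 'n ≤ 0' guard only makes the recursion total in Lean
-- (the Python diverges there; such inputs are excluded by Pre_).
def standard_bracket_order_py (n : Int) : List Int :=
  if _h0 : n ≤ 0 then []
  else if n = 1 then [1]
  else if n = 2 then [1, 2]
  else
    let half := standard_bracket_order_py (PySem.Int.floordiv n 2)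
    half.foldl (fun result seed => result ++ [seed] ++ [n + 1 - seed]) []
termination_by n.toNat
decreasing_by
  have := PySem.Int.floordiv_eq_ediv_of_pos (a := n) (b := 2) (by omega)
  omega

-- ===== PORT B =====
-- the while-loop collecting sizes: returns (sizes in append order, final m)
def pvSizesChain (m : Int) : List Int × Int :=
  if _h : m > 2 then
    let rest := pvSizesChain (PySem.Int.floordiv m 2)
    (m :: rest.1, rest.2)
  else ([], m)
termination_by m.toNat
decreasing_by
  have := PySem.Int.floordiv_eq_ediv_of_pos (a := m) (b := 2) (by omega)
  omega

def standard_bracket_order_py_alt (n : Int) : List Int :=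
  let p := pvSizesChain n
  let base : List Int := if p.2 = 1 then [1] else [1, 2]
  p.1.reverse.foldl (fun result size => result.flatMap (fun seed => [seed, size + 1 - seed])) base

-- ===== PRECONDITION & SPEC =====
-- Pre_ excludes n ≤ 0, on which the Python A recurses forever (RecursionError).
def Pre_standard_bracket_order_py (n : Int) : Prop := 1 ≤ n
instance (n : Int) : Decidable (Pre_standard_bracket_order_py n) := by unfold Pre_standard_bracket_order_py; infer_instance
def pvWitness_standard_bracket_order_py : Int := (8)
def Spec_standard_bracket_order_py (n : Int) (out : List Int) : Prop := out = standard_bracket_order_py_alt n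
instance (n : Int) (out : List Int) : Decidable (Spec_standard_bracket_order_py n out) := by unfold Spec_standard_bracket_order_py; infer_instance

-- ===== CLAIM (what is proved, stated in full; the proofs are below) =====
def Claim_equal_standard_bracket_order_py : Prop := ∀ (n : Int), Dom_standard_bracket_order_py n → Pre_standard_bracket_order_py n → Spec_standard_bracket_order_py n (standard_bracket_order_py n)

-- ===== LEMMAS AND PROOFS =====

-- unfold B at a recursive step n ≥ 3: one more expansion layer on top of B at n // 2
theorem alt_step (n : Int) (h : 3 ≤ n) :
    standard_bracket_order_py_alt n =
      (standard_bracket_order_py_alt (PySem.Int.floordiv n 2)).flatMap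
        (fun seed => [seed, n + 1 - seed]) := by
  unfold standard_bracket_order_py_alt
  rw [pvSizesChain]
  simp only [show n > 2 from by omega]
  simp [List.foldl_append]

-- the equivalence, by strong induction on n.toNat
theorem agree (k : Nat) : ∀ (n : Int), n.toNat ≤ k → 1 ≤ n →
    standard_bracket_order_py n = standard_bracket_order_py_alt n := by
  induction k with
  | zero => intro n hk h1; omega
  | succ k ih =>
    intro n hk h1
    by_cases h3 : n ≥ 3
    · have hdiv := PySem.Int.floordiv_eq_ediv_of_pos (a := n) (b := 2) (by omega)
      rw [alt_step n h3]
      rw [standard_bracket_order_py]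
      simp only [show ¬ n ≤ 0 from by omega, show ¬ n = 1 from by omega,
        show ¬ n = 2 from by omega, dif_neg, if_neg, not_false_iff]
      rw [ih (PySem.Int.floordiv n 2) (by omega) (by omega)]
      rw [show (fun (result : List Int) seed => result ++ [seed] ++ [n + 1 - seed])
            = fun (result : List Int) seed => result ++ ([seed] ++ [n + 1 - seed]) from by
          funext r s; simp]
      rw [PySem.List.foldl_append_eq_flatMap]
      simp
    · interval_cases n <;>
        simp [standard_bracket_order_py, standard_bracket_order_py_alt, pvSizesChain]

-- ===== VERDICT (by name: the statement is the Claim_ definition above) =====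
theorem standard_bracket_order_py_spec : Claim_equal_standard_bracket_order_py := by
  intro n _ hpre
  exact agree n.toNat n le_rfl hpre
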